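-- pv_equiv track=rewrite | github.com/kexinchu/dllm | research/legacy/analyze_dtype_sweep.py | first_div_idx
-- ===== SOURCE A (Python) =====
-- def first_div_idx(runs_by_bs, bs_set):
--     """For each problem, find earliest token position where any two bs differ."""
--     have = [bs for bs in bs_set if bs in runs_by_bs]
--     if len(have) < 2:
--         return None
--     all_pp = [runs_by_bs[bs]["per_problem"] for bs in have]
--     n = min(len(pp) for pp in all_pp)
--     idxs = []
--     for i in range(n):
--         toks_per_bs = [pp[i].get("token_ids") or pp[i].get("first_100_tokens", [])
--                        for pp in all_pp]
--         L = min(len(t) for t in toks_per_bs)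
--         div = L  # default: never diverge within window
--         for j in range(L):
--             if len(set(t[j] for t in toks_per_bs)) > 1:
--                 div = j; break
--         idxs.append(div)
--     return idxs
-- ===== SOURCE B (Python) =====
-- def _tok(p):
--     t = p.get("token_ids", [])
--     return t if t else p.get("first_100_tokens", [])
--
--
-- def _lcp(s, t):
--     k = 0
--     for a, b in zip(s, t):
--         if a != b:
--             return k
--         k += 1
--     return k
--
--
-- def first_div_idx(runs_by_bs, bs_set):
--     """For each problem, find earliest token position where any two bs differ."""
--     have = [bs for bs in bs_set if bs in runs_by_bs]
--     if len(have) < 2: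
--         return None
--     out = []
--     for probs in zip(*(runs_by_bs[bs]["per_problem"] for bs in have)):
--         toks = [_tok(p) for p in probs]
--         L = min(map(len, toks))
--         out.append(min([L] + [_lcp(toks[0], t) for t in toks[1:]]))
--     return out
-- ===== Notes on version B (the rewrite author's own statement) =====
-- stated objective: alternative
-- what changed: Replaces A's column-major scan (build a set of all sequences' j-th tokens at each position until its size exceeds 1) by a zip-transpose over the problems plus, per problem, a structural longest-common-prefix computation of each other sequence against the first; the divergence index is the minimum of those lcp's capped at the min-length window.
import Mathlib
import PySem

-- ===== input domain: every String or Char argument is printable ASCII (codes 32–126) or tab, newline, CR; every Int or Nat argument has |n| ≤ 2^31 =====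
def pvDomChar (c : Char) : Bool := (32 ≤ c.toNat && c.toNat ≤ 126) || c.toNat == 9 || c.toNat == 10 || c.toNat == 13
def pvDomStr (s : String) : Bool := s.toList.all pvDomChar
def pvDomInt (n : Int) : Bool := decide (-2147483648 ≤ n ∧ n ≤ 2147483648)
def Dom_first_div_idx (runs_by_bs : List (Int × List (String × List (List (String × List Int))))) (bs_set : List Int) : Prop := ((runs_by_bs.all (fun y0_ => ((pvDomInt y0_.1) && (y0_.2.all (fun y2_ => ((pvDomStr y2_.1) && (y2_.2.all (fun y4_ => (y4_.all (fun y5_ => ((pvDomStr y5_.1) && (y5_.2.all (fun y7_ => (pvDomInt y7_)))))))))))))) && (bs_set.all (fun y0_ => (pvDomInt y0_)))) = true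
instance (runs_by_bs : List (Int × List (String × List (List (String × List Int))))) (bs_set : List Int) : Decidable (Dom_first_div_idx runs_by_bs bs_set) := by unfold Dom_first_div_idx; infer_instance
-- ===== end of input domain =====

-- B replaces A's column-major set-based scan by a zip-transpose over the problems and a
-- per-pair longest-common-prefix computation whose minimum (capped at the length window)
-- is the divergence index (objective: alternative decomposition).


-- ===== PORT A =====
-- min(len(...) for ...) on a nonempty list (Python min of a nonempty iterable)
def pyMinNatA (xs : List Nat) : Nat :=
  match xs with
  | [] => 0          -- unreachable: Python min() raises on empty; never called on []
  | x :: r => r.foldl Nat.min x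

-- pp[i].get("token_ids") or pp[i].get("first_100_tokens", [])
def tokOfA (d : List (String × List Int)) : List Int :=
  match (PySem.Dict.mk d).get? "token_ids" with
  | some t => if t = [] then (PySem.Dict.mk d).getD "first_100_tokens" [] else t
  | none => (PySem.Dict.mk d).getD "first_100_tokens" []

-- 'for j in range(L): if len(set(t[j] for t in toks)) > 1: div = j; break' (div starts at L)
def divLoopA (toks : List (List Int)) (L j : Nat) : Nat :=
  if j < L then
    if 1 < (PySem.Set.ofList (toks.map (fun t => (PySem.List.pyGet? t (j : Int)).getD 0))).length
    then j
    else divLoopA toks L (j + 1)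
  else L
termination_by L - j

def first_div_idx (runs_by_bs : List (Int × List (String × List (List (String × List Int))))) (bs_set : List Int) : Option (List Int) :=
  let haveBs := bs_set.filter (fun bs => ((PySem.Dict.mk runs_by_bs).get? bs).isSome)
  if haveBs.length < 2 then none
  else
    -- runs_by_bs[bs]["per_problem"]: both lookups succeed (bs was filtered in; "per_problem"
    -- present by Pre_first_div_idx — a missing key is a Python KeyError, excluded there)
    let all_pp := haveBs.map (fun bs =>
      (PySem.Dict.mk ((PySem.Dict.mk runs_by_bs).getD bs [])).getD "per_problem" [])
    let n := pyMinNatA (all_pp.map List.length)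
    some ((List.range n).map (fun (i : Nat) =>
      -- pp[i]: i < n ≤ len(pp), always in range
      let toks := all_pp.map (fun pp => tokOfA ((PySem.List.pyGet? pp (i : Int)).getD []))
      let L := pyMinNatA (toks.map List.length)
      Int.ofNat (divLoopA toks L 0)))

-- ===== PORT B =====
-- _tok(p): p.get("token_ids", []) if truthy, else p.get("first_100_tokens", [])
def tokB (d : List (String × List Int)) : List Int :=
  let t := (PySem.Dict.mk d).getD "token_ids" []
  if t = [] then (PySem.Dict.mk d).getD "first_100_tokens" [] else t

-- _lcp(s, t): length of the common prefix of the zipped pair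
def lcpB : List Int → List Int → Nat
  | a :: s, b :: t => if a = b then lcpB s t + 1 else 0
  | _, _ => 0

-- min of a nonempty list written as head + foldr over the tail
def pyMin1 (x : Nat) (xs : List Nat) : Nat := xs.foldr Nat.min x

-- termination fact for zipStarB, cited in decreasing_by
theorem zipStarB_dec {α : Type} :
    ∀ ls : List (List α), ls ≠ [] → (ls.any List.isEmpty) = false →
      ((ls.map List.tail).map List.length).sum < (ls.map List.length).sum := by
  intro ls hne hall
  induction ls with
  | nil => exact absurd rfl hne
  | cons l ls ih =>
    simp only [List.any_cons, Bool.or_eq_false_iff] at hall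
    have hlne : l ≠ [] := by
      intro e
      rw [e] at hall
      simp at hall
    have h1 : l.tail.length < l.length := by
      cases l with
      | nil => exact absurd rfl hlne
      | cons a t => simp
    by_cases hls : ls = []
    · subst hls; simpa using h1
    · have := ih hls hall.2
      simp only [List.map_cons, List.sum_cons]
      omega

-- zip(*it): transpose truncated at the shortest row
def zipStarB {α : Type} (ls : List (List α)) : List (List α) :=
  if hne : ls = [] then []
  else if h : ls.any List.isEmpty then []
  else ls.filterMap List.head? :: zipStarB (ls.map List.tail)
termination_by (ls.map List.length).sum
decreasing_by exact zipStarB_dec ls hne (by simp only [Bool.not_eq_true] at h; exact h)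

-- one problem column: toks, window L, and min of L with all lcp's against toks[0]
def divB (probs : List (List (String × List Int))) : Nat :=
  match probs.map tokB with
  | [] => 0          -- unreachable: probs has ≥ 2 entries (toks[0] would raise on [])
  | t0 :: rest => pyMin1 (pyMin1 t0.length (rest.map List.length)) (rest.map (lcpB t0))

def first_div_idx_alt (runs_by_bs : List (Int × List (String × List (List (String × List Int))))) (bs_set : List Int) : Option (List Int) :=
  let haveBs := bs_set.filter (fun bs => ((PySem.Dict.mk runs_by_bs).get? bs).isSome)
  if haveBs.length < 2 then none
  else some ((zipStarB (haveBs.map (fun bs =>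
      (PySem.Dict.mk ((PySem.Dict.mk runs_by_bs).getD bs [])).getD "per_problem" []))).map
    (fun probs => Int.ofNat (divB probs)))

-- ===== PRECONDITION & SPEC =====
-- Pre_ excludes exactly the inputs where A raises KeyError: when at least two batch sizes of
-- bs_set occur in runs_by_bs, every such entry must contain the key "per_problem".
def Pre_first_div_idx (runs_by_bs : List (Int × List (String × List (List (String × List Int))))) (bs_set : List Int) : Prop :=
  2 ≤ (bs_set.filter (fun bs => ((PySem.Dict.mk runs_by_bs).get? bs).isSome)).length →
    ∀ bs ∈ bs_set, ∀ d ∈ (PySem.Dict.mk runs_by_bs).get? bs,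
      ((PySem.Dict.mk d).get? "per_problem").isSome
instance (runs_by_bs : List (Int × List (String × List (List (String × List Int))))) (bs_set : List Int) : Decidable (Pre_first_div_idx runs_by_bs bs_set) := by unfold Pre_first_div_idx; infer_instance

def pvWitness_first_div_idx : (List (Int × List (String × List (List (String × List Int))))) × List Int :=
  ([(1, [("per_problem", [[("token_ids", [7, 8])]])]),
    (2, [("per_problem", [[("token_ids", [7, 9])]])])],
   [1, 2])

def Spec_first_div_idx (runs_by_bs : List (Int × List (String × List (List (String × List Int))))) (bs_set : List Int) (out : Option (List Int)) : Prop := out = first_div_idx_alt runs_by_bs bs_set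
instance (runs_by_bs : List (Int × List (String × List (List (String × List Int))))) (bs_set : List Int) (out : Option (List Int)) : Decidable (Spec_first_div_idx runs_by_bs bs_set out) := by unfold Spec_first_div_idx; infer_instance

-- ===== CLAIM (what is proved, stated in full; the proofs are below) =====
def Claim_equal_first_div_idx : Prop := ∀ (runs_by_bs : List (Int × List (String × List (List (String × List Int))))) (bs_set : List Int), Dom_first_div_idx runs_by_bs bs_set → Pre_first_div_idx runs_by_bs bs_set → Spec_first_div_idx runs_by_bs bs_set (first_div_idx runs_by_bs bs_set)

-- ===== LEMMAS AND PROOFS =====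

theorem pvWitness_ok : Dom_first_div_idx pvWitness_first_div_idx.1 pvWitness_first_div_idx.2 ∧
    Pre_first_div_idx pvWitness_first_div_idx.1 pvWitness_first_div_idx.2 := by decide

theorem tokB_eq : tokB = tokOfA := by
  funext d
  unfold tokB tokOfA PySem.Dict.getD
  cases h : (PySem.Dict.mk d).get? "token_ids" <;> simp [h]

-- ---- facts about foldl/foldr Nat.min ----
theorem minA_mem : ∀ (r : List Nat) (x : Nat), r.foldl Nat.min x ∈ x :: r := by
  intro r
  induction r with
  | nil => simp
  | cons a r ih =>
    intro x
    simp only [List.foldl_cons]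
    rcases List.mem_cons.mp (ih (Nat.min x a)) with h | h
    · have hxa : Nat.min x a = x ∨ Nat.min x a = a := by
        simp only [Nat.min_eq_min]; omega
      rcases hxa with he | he <;> rw [he] at h ⊢ <;> simp [h]
    · simp [h]

theorem minA_le : ∀ (r : List Nat) (x y : Nat), y ∈ x :: r → r.foldl Nat.min x ≤ y := by
  intro r
  induction r with
  | nil => intro x y hy; simp at hy; simp [List.foldl, hy]
  | cons a r ih =>
    intro x y hy
    simp only [List.foldl_cons]
    rcases List.mem_cons.mp hy with rfl | hy'
    · refine le_trans (ih (Nat.min y a) _ (List.mem_cons_self ..)) ?_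
      simp only [Nat.min_eq_min]; omega
    · rcases List.mem_cons.mp hy' with rfl | hy''
      · refine le_trans (ih (Nat.min x y) _ (List.mem_cons_self ..)) ?_
        simp only [Nat.min_eq_min]; omega
      · exact ih (Nat.min x a) y (List.mem_cons_of_mem _ hy'')

theorem foldl_min_pull : ∀ (r : List Nat) (x a : Nat),
    r.foldl Nat.min (Nat.min x a) = Nat.min a (r.foldl Nat.min x) := by
  intro r
  induction r with
  | nil => intro x a; simp [Nat.min_comm]
  | cons b r ih =>
    intro x a
    simp only [List.foldl_cons]
    rw [show Nat.min (Nat.min x a) b = Nat.min (Nat.min x b) a by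
      simp only [Nat.min_eq_min]; omega]
    exact ih (Nat.min x b) a

theorem pyMin1_eq_foldl : ∀ (r : List Nat) (x : Nat), pyMin1 x r = r.foldl Nat.min x := by
  intro r
  induction r with
  | nil => intro x; rfl
  | cons a r ih =>
    intro x
    simp only [pyMin1, List.foldr_cons] at *
    rw [ih x, List.foldl_cons, foldl_min_pull]

theorem foldl_min_sub_one : ∀ (r : List Nat) (x : Nat),
    (r.map (· - 1)).foldl Nat.min (x - 1) = (r.foldl Nat.min x) - 1 := by
  intro r
  induction r with
  | nil => intro x; rfl
  | cons a r ih =>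
    intro x
    simp only [List.map_cons, List.foldl_cons]
    rw [show Nat.min (x - 1) (a - 1) = Nat.min x a - 1 by
      simp only [Nat.min_eq_min]; omega]
    exact ih (Nat.min x a)

-- ---- facts about lcpB ----
theorem lcp_agree : ∀ (s t : List Int) (j : Nat), j < lcpB s t → s[j]? = t[j]? := by
  intro s
  induction s with
  | nil => intro t j h; simp [lcpB] at h
  | cons a s ih =>
    intro t j h
    cases t with
    | nil => simp [lcpB] at h
    | cons b t =>
      by_cases hab : a = b
      · subst hab
        have he : lcpB (a :: s) (a :: t) = lcpB s t + 1 := by simp [lcpB]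
        rw [he] at h
        cases j with
        | zero => simp
        | succ j => simpa using ih t j (by omega)
      · have he : lcpB (a :: s) (b :: t) = 0 := by simp [lcpB, hab]
        rw [he] at h
        omega

theorem lcp_mismatch : ∀ (s t : List Int), lcpB s t < s.length → lcpB s t < t.length →
    s[lcpB s t]? ≠ t[lcpB s t]? := by
  intro s
  induction s with
  | nil => intro t h _; simp at h
  | cons a s ih =>
    intro t hs ht
    cases t with
    | nil => simp at ht
    | cons b t =>
      by_cases hab : a = b
      · subst hab
        have he : lcpB (a :: s) (a :: t) = lcpB s t + 1 := by simp [lcpB]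
        rw [he] at hs ht ⊢
        simpa using ih t (by simpa using hs) (by simpa using ht)
      · have he : lcpB (a :: s) (b :: t) = 0 := by simp [lcpB, hab]
        rw [he]
        simp [hab]

-- ---- first-index machinery (shared characterisation of both loops) ----
-- k is the first index < L satisfying p (else L)
def IsFirst (p : Nat → Bool) (L k : Nat) : Prop :=
  k ≤ L ∧ (∀ j, j < k → p j = false) ∧ (k < L → p k = true)

theorem isFirst_unique {p : Nat → Bool} {L k k' : Nat}
    (h : IsFirst p L k) (h' : IsFirst p L k') : k = k' := by
  obtain ⟨hk, hbelow, hat⟩ := h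
  obtain ⟨hk', hbelow', hat'⟩ := h'
  rcases Nat.lt_trichotomy k k' with hlt | heq | hgt
  · have := hat (lt_of_lt_of_le hlt hk'); have := hbelow' k hlt; simp_all
  · exact heq
  · have := hat' (lt_of_lt_of_le hgt hk); have := hbelow k' hgt; simp_all

theorem isFirst_congr {p q : Nat → Bool} {L k : Nat}
    (hpq : ∀ j, p j = q j) (h : IsFirst p L k) : IsFirst q L k := by
  obtain ⟨hk, hbelow, hat⟩ := h
  exact ⟨hk, fun j hj => (hpq j) ▸ hbelow j hj, fun hlt => (hpq k) ▸ hat hlt⟩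

theorem divLoopA_isFirst (toks : List (List Int)) (L : Nat) :
    ∀ j, j ≤ L →
      (∀ k, k < j → (decide (1 < (PySem.Set.ofList (toks.map (fun t => (PySem.List.pyGet? t (k : Int)).getD 0))).length)) = false) →
      IsFirst (fun k => decide (1 < (PySem.Set.ofList (toks.map (fun t => (PySem.List.pyGet? t (k : Int)).getD 0))).length)) L (divLoopA toks L j) := by
  suffices h : ∀ (d j : Nat), L ≤ j + d → j ≤ L →
      (∀ k, k < j → (decide (1 < (PySem.Set.ofList (toks.map (fun t => (PySem.List.pyGet? t (k : Int)).getD 0))).length)) = false) →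
      IsFirst (fun k => decide (1 < (PySem.Set.ofList (toks.map (fun t => (PySem.List.pyGet? t (k : Int)).getD 0))).length)) L (divLoopA toks L j) by
    intro j hj hb; exact h (L - j) j (by omega) hj hb
  intro d
  induction d with
  | zero =>
    intro j hd hjL hbelow
    have : j = L := by omega
    subst this
    rw [divLoopA]
    simp only [lt_irrefl, if_false]
    exact ⟨le_refl _, hbelow, fun h => absurd h (lt_irrefl _)⟩
  | succ d ih =>
    intro j hd hjL hbelow
    rw [divLoopA]
    split
    next hlt =>
      split
      next hcond =>
        exact ⟨le_of_lt hlt, hbelow, fun _ => decide_eq_true hcond⟩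
      next hcond =>
        exact ih (j + 1) (by omega) hlt (by
          intro k hk
          rcases Nat.lt_or_ge k j with h | h
          · exact hbelow k h
          · have : k = j := by omega
            subst this; exact decide_eq_false hcond)
    next hge =>
      have : j = L := by omega
      subst this
      exact ⟨le_refl _, hbelow, fun h => absurd h (lt_irrefl _)⟩

-- set-cardinality characterisation: folding Set.add over a nonempty accumulator
theorem foldl_add_length_le {α : Type} [BEq α] [LawfulBEq α] (l : List α) :
    ∀ s : List α, s.length ≤ (l.foldl PySem.Set.add s).length := by
  induction l with
  | nil => simp
  | cons x l ih =>
    intro s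
    refine le_trans ?_ (ih (PySem.Set.add s x))
    simp only [PySem.Set.add]
    split
    · exact le_refl _
    · simp

theorem foldl_add_one_lt {α : Type} [BEq α] [LawfulBEq α] (l : List α) :
    ∀ s : List α, 0 < s.length →
      (1 < (l.foldl PySem.Set.add s).length ↔ 1 < s.length ∨ ∃ y ∈ l, y ∉ s) := by
  induction l with
  | nil => simp
  | cons x l ih =>
    intro s hs
    simp only [List.foldl_cons]
    by_cases hmem : x ∈ s
    · have hadd : PySem.Set.add s x = s := by
        simp [PySem.Set.add, hmem]
      rw [hadd, ih s hs]
      constructor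
      · rintro (h | ⟨y, hy, hny⟩)
        · exact Or.inl h
        · exact Or.inr ⟨y, List.mem_cons_of_mem _ hy, hny⟩
      · rintro (h | ⟨y, hy, hny⟩)
        · exact Or.inl h
        · rcases List.mem_cons.mp hy with rfl | hy'
          · exact absurd hmem hny
          · exact Or.inr ⟨y, hy', hny⟩
    · have hadd : PySem.Set.add s x = s ++ [x] := by
        simp [PySem.Set.add, hmem]
      rw [hadd]
      have hlen : 1 < (s ++ [x]).length := by simp; omega
      have := foldl_add_length_le l (s ++ [x])
      constructor
      · intro _; exact Or.inr ⟨x, List.mem_cons_self .., hmem⟩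
      · intro _; omega

theorem set_card_gt_one {α : Type} [BEq α] [LawfulBEq α] (x : α) (l : List α) :
    1 < (PySem.Set.ofList (x :: l)).length ↔ ∃ y ∈ l, y ≠ x := by
  have h0 : PySem.Set.ofList (x :: l) = l.foldl PySem.Set.add [x] := by
    rw [PySem.Set.ofList_eq_foldl]
    simp [PySem.Set.add]
  rw [h0, foldl_add_one_lt l [x] (by simp)]
  simp

-- the column condition of A is 'some other sequence differs from the first one at k'
theorem colA_eq (t0 : List Int) (rest : List (List Int)) (k : Nat) :
    (decide (1 < (PySem.Set.ofList ((t0 :: rest).map (fun t => (PySem.List.pyGet? t (k : Int)).getD 0))).length)) =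
      rest.any (fun s => decide ((PySem.List.pyGet? s (k : Int)).getD 0 ≠ (PySem.List.pyGet? t0 (k : Int)).getD 0)) := by
  simp only [List.map_cons]
  rw [Bool.eq_iff_iff]
  rw [decide_eq_true_iff, set_card_gt_one, List.any_eq_true]
  constructor
  · rintro ⟨y, hy, hny⟩
    rcases List.mem_map.mp hy with ⟨s, hs, rfl⟩
    exact ⟨s, hs, by simpa using hny⟩
  · rintro ⟨s, hs, hds⟩
    exact ⟨_, List.mem_map_of_mem hs, by simpa using hds⟩

-- B's capped minimum of lcp's is the first mismatch column
theorem minB_isFirst (t0 : List Int) (rest : List (List Int)) (L : Nat)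
    (hL0 : L ≤ t0.length) (hLs : ∀ s ∈ rest, L ≤ s.length) :
    IsFirst (fun k => rest.any (fun s => decide ((PySem.List.pyGet? s (k : Int)).getD 0 ≠ (PySem.List.pyGet? t0 (k : Int)).getD 0))) L
      (pyMin1 L (rest.map (lcpB t0))) := by
  rw [pyMin1_eq_foldl]
  set m := (rest.map (lcpB t0)).foldl Nat.min L with hm
  have hmle : m ≤ L := minA_le _ _ _ (List.mem_cons_self ..)
  refine ⟨hmle, ?_, ?_⟩
  · intro j hj
    rw [List.any_eq_false]
    intro s hs
    have hjl : j < lcpB t0 s :=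
      lt_of_lt_of_le hj (minA_le _ _ _ (List.mem_cons_of_mem _ (List.mem_map_of_mem hs)))
    have := lcp_agree t0 s j hjl
    simp [PySem.List.pyGet?_natCast, this]
  · intro hmL
    rcases List.mem_cons.mp (minA_mem (rest.map (lcpB t0)) L) with h | h
    · omega
    · rcases List.mem_map.mp h with ⟨s, hs, hls⟩
      have hmt0 : m < t0.length := lt_of_lt_of_le hmL hL0
      have hmst : m < s.length := lt_of_lt_of_le hmL (hLs s hs)
      have hlm : lcpB t0 s = m := by rw [hm]; exact hls
      have hne : t0[m]? ≠ s[m]? := by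
        rw [← hlm]
        exact lcp_mismatch t0 s (by rw [hlm]; exact hmt0) (by rw [hlm]; exact hmst)
      rw [List.any_eq_true]
      refine ⟨s, hs, ?_⟩
      rw [decide_eq_true_iff]
      intro heq
      apply hne
      rw [List.getElem?_eq_getElem hmt0, List.getElem?_eq_getElem hmst]
      simp only [PySem.List.pyGet?_natCast] at heq
      rw [List.getElem?_eq_getElem hmst, List.getElem?_eq_getElem hmt0] at heq
      simp at heq
      simp [heq]

-- per problem: A's column scan equals B's capped minimum of lcp's
theorem div_eq (t0 : List Int) (rest : List (List Int)) (L : Nat)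
    (hL0 : L ≤ t0.length) (hLs : ∀ s ∈ rest, L ≤ s.length) :
    divLoopA (t0 :: rest) L 0 = pyMin1 L (rest.map (lcpB t0)) := by
  have hA := divLoopA_isFirst (t0 :: rest) L 0 (Nat.zero_le _) (by omega)
  exact isFirst_unique (isFirst_congr (fun j => colA_eq t0 rest j) hA)
    (minB_isFirst t0 rest L hL0 hLs)

-- ---- zipStarB as an indexed transpose ----
theorem filterMap_head_eq {α : Type} (d : α) :
    ∀ ls : List (List α), (∀ l ∈ ls, l ≠ []) →
      ls.filterMap List.head? = ls.map (fun l => l.getD 0 d) := by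
  intro ls h
  induction ls with
  | nil => rfl
  | cons l ls ih =>
    have hl : l ≠ [] := h l (List.mem_cons_self ..)
    cases l with
    | nil => exact absurd rfl hl
    | cons a t =>
      have h1 : ((a :: t) :: ls).filterMap List.head? = a :: ls.filterMap List.head? := by simp
      rw [h1, ih (fun l hl' => h l (List.mem_cons_of_mem _ hl'))]
      simp [List.getD]

theorem getD_succ_tail {α : Type} (d : α) (l : List α) (i : Nat) :
    l.getD (i + 1) d = l.tail.getD i d := by
  cases l <;> simp [List.getD]

theorem zipStarB_eq {α : Type} (d : α) :
    ∀ (N : Nat) (ls : List (List α)), (ls.map List.length).sum ≤ N → ls ≠ [] →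
      zipStarB ls = (List.range (pyMinNatA (ls.map List.length))).map
        (fun i => ls.map (fun l => l.getD i d)) := by
  intro N
  induction N with
  | zero =>
    intro ls hsum hne
    -- every row is empty
    have hall : ∀ l ∈ ls, l = [] := by
      intro l hl
      have : l.length ≤ (ls.map List.length).sum := List.le_sum_of_mem (List.mem_map_of_mem hl)
      have : l.length = 0 := by omega
      exact List.eq_nil_of_length_eq_zero this
    cases ls with
    | nil => exact absurd rfl hne
    | cons l ls' =>
      have hl : l = [] := hall l (List.mem_cons_self ..)
      have hmin : pyMinNatA ((l :: ls').map List.length) = 0 := by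
        have := minA_le (ls'.map List.length) l.length 0 (by simp [hl])
        simp only [pyMinNatA, List.map_cons]
        omega
      rw [hmin, zipStarB]
      simp [hl]
  | succ N ih =>
    intro ls hsum hne
    by_cases hemp : ls.any List.isEmpty
    · -- some empty row: both sides are []
      have hmin : pyMinNatA (ls.map List.length) = 0 := by
        rcases List.any_eq_true.mp hemp with ⟨l, hl, hle⟩
        have hl0 : l.length = 0 := by
          cases l with
          | nil => rfl
          | cons a t => simp [List.isEmpty] at hle
        cases ls with
        | nil => exact absurd rfl hne
        | cons l0 ls' =>
          have hmem : (0 : Nat) ∈ l0.length :: ls'.map List.length := by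
            rcases List.mem_cons.mp hl with rfl | hl'
            · simp [hl0]
            · exact List.mem_cons_of_mem _ (hl0 ▸ List.mem_map_of_mem hl')
          have := minA_le (ls'.map List.length) l0.length 0 hmem
          simp only [pyMinNatA, List.map_cons]
          omega
      rw [hmin, zipStarB]
      simp [hne, hemp]
    · -- all rows nonempty
      have hallne : ∀ l ∈ ls, l ≠ [] := by
        intro l hl hleq
        exact hemp (List.any_eq_true.mpr ⟨l, hl, by simp [hleq]⟩)
      have hdec := zipStarB_dec ls hne (by simp only [Bool.not_eq_true] at hemp; exact hemp)
      have htne : ls.map List.tail ≠ [] := by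
        cases ls
        · exact absurd rfl hne
        · simp
      have hih := ih (ls.map List.tail) (by omega) htne
      -- min of the tails is min - 1
      have hlens : (ls.map List.tail).map List.length = (ls.map List.length).map (· - 1) := by
        simp only [List.map_map]
        exact List.map_congr_left (fun l _ => by simp)
      have hminpos : 1 ≤ pyMinNatA (ls.map List.length) := by
        cases ls with
        | nil => exact absurd rfl hne
        | cons l0 ls' =>
          rcases List.mem_cons.mp (minA_mem (ls'.map List.length) l0.length) with h | h
          · have := hallne l0 (List.mem_cons_self ..)
            simp only [pyMinNatA, List.map_cons]
            rw [h]
            cases l0 with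
            | nil => exact absurd rfl this
            | cons a t => simp
          · rcases List.mem_map.mp h with ⟨l, hl, hll⟩
            have := hallne l (List.mem_cons_of_mem _ hl)
            simp only [pyMinNatA, List.map_cons]
            rw [← hll]
            cases l with
            | nil => exact absurd rfl this
            | cons a t => simp
      have hmint : pyMinNatA ((ls.map List.tail).map List.length) = pyMinNatA (ls.map List.length) - 1 := by
        rw [hlens]
        cases ls with
        | nil => exact absurd rfl hne
        | cons l0 ls' =>
          simp only [pyMinNatA, List.map_cons]
          exact foldl_min_sub_one (ls'.map List.length) l0.length
      rw [zipStarB, dif_neg hne, dif_neg hemp, hih, hmint,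
        filterMap_head_eq d ls hallne]
      have hn : pyMinNatA (ls.map List.length) = (pyMinNatA (ls.map List.length) - 1) + 1 := by omega
      conv_rhs => rw [hn, List.range_succ_eq_map]
      simp only [List.map_cons, List.map_map]
      congr 1
      apply List.map_congr_left
      intro i _
      simp only [Function.comp, Nat.succ_eq_add_one]
      apply List.map_congr_left
      intro l _
      simp only [Function.comp]
      exact (getD_succ_tail d l i).symm

-- main equivalence
theorem main_eq (runs_by_bs : List (Int × List (String × List (List (String × List Int))))) (bs_set : List Int) :
    first_div_idx runs_by_bs bs_set = first_div_idx_alt runs_by_bs bs_set := by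
  unfold first_div_idx first_div_idx_alt
  set haveBs := bs_set.filter (fun bs => ((PySem.Dict.mk runs_by_bs).get? bs).isSome) with hhave
  by_cases hlen : haveBs.length < 2
  · simp [hlen]
  · simp only [if_neg hlen]
    congr 1
    set all_pp := haveBs.map (fun bs =>
      (PySem.Dict.mk ((PySem.Dict.mk runs_by_bs).getD bs [])).getD "per_problem" []) with hpp
    have hppne : all_pp ≠ [] := by
      intro h
      have := congrArg List.length h
      simp only [hpp, List.length_map, List.length_nil] at this
      omega
    rw [zipStarB_eq ([] : List (String × List Int)) ((all_pp.map List.length).sum) all_pp (le_refl _) hppne]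
    conv_rhs => rw [List.map_map]
    apply List.map_congr_left
    intro i hi
    simp only [Function.comp]
    -- the two token lists coincide
    have htoks : all_pp.map (fun pp => tokOfA ((PySem.List.pyGet? pp (i : Int)).getD [])) =
        (all_pp.map (fun l => l.getD i [])).map tokB := by
      conv_rhs => rw [List.map_map]
      apply List.map_congr_left
      intro pp _
      simp only [Function.comp, PySem.List.pyGet?_natCast, tokB_eq, List.getD_eq_getElem?_getD]
    rw [divB, ← htoks]
    cases htk : all_pp.map (fun pp => tokOfA ((PySem.List.pyGet? pp (i : Int)).getD [])) with
    | nil =>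
      exfalso
      have := congrArg List.length htk
      simp only [List.length_map, List.length_nil] at this
      exact hppne (List.eq_nil_of_length_eq_zero this)
    | cons t0 rest =>
      simp only []
      congr 1
      have hLeq : pyMinNatA ((t0 :: rest).map List.length) = pyMin1 t0.length (rest.map List.length) := by
        rw [pyMin1_eq_foldl]; rfl
      rw [← hLeq]
      apply div_eq
      · exact minA_le (rest.map List.length) t0.length t0.length (List.mem_cons_self ..)
      · intro s hs
        exact minA_le (rest.map List.length) t0.length s.length
          (List.mem_cons_of_mem _ (List.mem_map_of_mem hs))

-- ===== VERDICT (by name: the statement is the Claim_ definition above) =====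
theorem first_div_idx_spec : Claim_equal_first_div_idx := by
  intro runs_by_bs bs_set _ _
  unfold Spec_first_div_idx
  exact main_eq runs_by_bs bs_set
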